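-- pv_equiv track=rewrite | github.com/slaclab/lcls-python3-envs | scripts/compare_conda_envs.py | format_markdown
-- ===== SOURCE A (Python) =====
-- def format_markdown(updated, added, removed):
--     lines = []
--
--     if updated:
--         lines.append("**Updated Packages**")
--         lines.append("| Package | Old Version | New Version |")
--         lines.append("|---------|-------------|-------------|")
--         for pkg, old, new in updated:
--             lines.append(f"| {pkg} | {old} | {new} |")
--         lines.append("")
--
--     if added:
--         lines.append("**New Packages**")
--         lines.append("| Package | Version |")
--         lines.append("|---------|---------|")
--         for pkg, ver in added:
--             lines.append(f"| {pkg} | {ver} |")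
--         lines.append("")
--
--     if removed:
--         lines.append("**Removed Packages**")
--         lines.append("| Package | Version |")
--         lines.append("|---------|---------|")
--         for pkg, ver in removed:
--             lines.append(f"| {pkg} | {ver} |")
--         lines.append("")
--
--     return "\n".join(lines)
-- ===== SOURCE B (Python) =====
-- def format_markdown(updated, added, removed):
--     sections = []
--     if updated:
--         sections.append(("**Updated Packages**",
--                          "| Package | Old Version | New Version |",
--                          "|---------|-------------|-------------|",
--                          [list(row) for row in updated]))
--     if added:
--         sections.append(("**New Packages**",
--                          "| Package | Version |",
--                          "|---------|---------|",
--                          [list(row) for row in added]))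
--     if removed:
--         sections.append(("**Removed Packages**",
--                          "| Package | Version |",
--                          "|---------|---------|",
--                          [list(row) for row in removed]))
--     lines = []
--     for title, header, sep, rows in sections:
--         lines.append(title)
--         lines.append(header)
--         lines.append(sep)
--         for row in rows:
--             lines.append("| " + " | ".join(str(x) for x in row) + " |")
--         lines.append("")
--     return "\n".join(lines)
-- ===== Notes on version B (the rewrite author's own statement) =====
-- stated objective: simpler
-- what changed: Replaces three hardcoded copy-pasted section blocks with a data-driven list of (title, header, separator, rows) section descriptors rendered by one uniform loop with a generic ' | '.join row renderer.
import Mathlib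
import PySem

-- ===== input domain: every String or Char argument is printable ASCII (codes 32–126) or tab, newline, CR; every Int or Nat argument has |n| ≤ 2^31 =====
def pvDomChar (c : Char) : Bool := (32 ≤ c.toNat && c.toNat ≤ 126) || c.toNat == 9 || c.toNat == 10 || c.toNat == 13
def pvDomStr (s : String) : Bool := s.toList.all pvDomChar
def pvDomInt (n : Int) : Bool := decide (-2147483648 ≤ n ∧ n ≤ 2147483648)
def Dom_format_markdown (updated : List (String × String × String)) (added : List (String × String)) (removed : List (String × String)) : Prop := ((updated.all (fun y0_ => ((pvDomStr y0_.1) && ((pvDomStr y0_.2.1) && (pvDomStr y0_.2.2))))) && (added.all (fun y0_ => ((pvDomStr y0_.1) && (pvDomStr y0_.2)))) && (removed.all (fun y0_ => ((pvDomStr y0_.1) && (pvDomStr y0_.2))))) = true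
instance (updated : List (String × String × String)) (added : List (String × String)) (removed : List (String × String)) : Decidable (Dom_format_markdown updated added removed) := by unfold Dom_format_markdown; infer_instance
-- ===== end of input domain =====

-- B builds a list of section descriptors (title, header, separator, generic rows) and renders them
-- with one uniform loop and a generic row joiner, instead of A's three hardcoded blocks (objective: simpler).

-- ===== PORT A =====
def format_markdown (updated : List (String × String × String)) (added : List (String × String)) (removed : List (String × String)) : String :=
  let lines : List String := []
  let lines :=
    if updated.isEmpty then lines else
      (updated.foldl (fun acc t => acc ++ ["| " ++ t.1 ++ " | " ++ t.2.1 ++ " | " ++ t.2.2 ++ " |"])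
        (lines ++ ["**Updated Packages**",
                   "| Package | Old Version | New Version |",
                   "|---------|-------------|-------------|"])) ++ [""]
  let lines :=
    if added.isEmpty then lines else
      (added.foldl (fun acc t => acc ++ ["| " ++ t.1 ++ " | " ++ t.2 ++ " |"])
        (lines ++ ["**New Packages**",
                   "| Package | Version |",
                   "|---------|---------|"])) ++ [""]
  let lines :=
    if removed.isEmpty then lines else
      (removed.foldl (fun acc t => acc ++ ["| " ++ t.1 ++ " | " ++ t.2 ++ " |"])
        (lines ++ ["**Removed Packages**",
                   "| Package | Version |",
                   "|---------|---------|"])) ++ [""]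
  PySem.Str.join "\n" lines

-- ===== PORT B =====
-- generic row renderer: '| ' + ' | '.join(row) + ' |' (rows are strings already, str(x) = x)
def pvRenderRow (row : List String) : String :=
  "| " ++ PySem.Str.join " | " row ++ " |"

def format_markdown_alt (updated : List (String × String × String)) (added : List (String × String)) (removed : List (String × String)) : String :=
  let sections : List (String × String × String × List (List String)) := []
  let sections :=
    if updated.isEmpty then sections else
      sections ++ [("**Updated Packages**",
                    "| Package | Old Version | New Version |",
                    "|---------|-------------|-------------|",
                    updated.map (fun t => [t.1, t.2.1, t.2.2]))]
  let sections :=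
    if added.isEmpty then sections else
      sections ++ [("**New Packages**",
                    "| Package | Version |",
                    "|---------|---------|",
                    added.map (fun t => [t.1, t.2]))]
  let sections :=
    if removed.isEmpty then sections else
      sections ++ [("**Removed Packages**",
                    "| Package | Version |",
                    "|---------|---------|",
                    removed.map (fun t => [t.1, t.2]))]
  let lines : List String :=
    sections.foldl
      (fun acc s =>
        (s.2.2.2.foldl (fun a row => a ++ [pvRenderRow row])
          (acc ++ [s.1, s.2.1, s.2.2.1])) ++ [""])
      []
  PySem.Str.join "\n" lines

-- ===== PRECONDITION & SPEC =====
def Spec_format_markdown (updated : List (String × String × String)) (added : List (String × String)) (removed : List (String × String)) (out : String) : Prop := out = format_markdown_alt updated added removed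
instance (updated : List (String × String × String)) (added : List (String × String)) (removed : List (String × String)) (out : String) : Decidable (Spec_format_markdown updated added removed out) := by unfold Spec_format_markdown; infer_instance

-- ===== CLAIM (what is proved, stated in full; the proofs are below) =====
def Claim_equal_format_markdown : Prop := ∀ (updated : List (String × String × String)) (added : List (String × String)) (removed : List (String × String)), Dom_format_markdown updated added removed → Spec_format_markdown updated added removed (format_markdown updated added removed)

-- ===== LEMMAS AND PROOFS =====

theorem join_three (a b c : String) :
    PySem.Str.join " | " [a, b, c] = a ++ " | " ++ b ++ " | " ++ c := by
  simp [PySem.Str.join, PySem.Chars.join, List.intercalate, List.intersperse,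
        String.append_assoc]
  rw [show (' ' :: '|' :: ' ' :: (b.toList ++ ' ' :: '|' :: ' ' :: c.toList)) =
        " | ".toList ++ (b.toList ++ (" | ".toList ++ c.toList)) from rfl]
  rw [String.ofList_append, String.ofList_append, String.ofList_append,
      String.ofList_toList, String.ofList_toList]
  simp [String.ofList_toList]

theorem join_two (a b : String) :
    PySem.Str.join " | " [a, b] = a ++ " | " ++ b := by
  simp [PySem.Str.join, PySem.Chars.join, List.intercalate, List.intersperse,
        String.append_assoc]
  rw [show (' ' :: '|' :: ' ' :: b.toList) = " | ".toList ++ b.toList from rfl,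
      String.ofList_append, String.ofList_toList]
  simp [String.ofList_toList]

-- ===== VERDICT (by name: the statement is the Claim_ definition above) =====
theorem format_markdown_spec : Claim_equal_format_markdown := by
  intro updated added removed _
  unfold Spec_format_markdown format_markdown format_markdown_alt
  by_cases hu : updated.isEmpty <;> by_cases ha : added.isEmpty <;> by_cases hr : removed.isEmpty <;>
    simp [hu, ha, hr, pvRenderRow, join_three, join_two, List.map_map,
          Function.comp_def, String.append_assoc]
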